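-- pv_equiv track=rewrite | github.com/Jre321/Ajedrez | Ajedrez/1_bloqueo.py | calcular_movimientos
-- ===== SOURCE A (Python) =====
-- def calcular_movimientos(n, fila_reina, col_reina, fila_bloqueo, col_bloqueo):
--     """Calcula los movimientos posibles de la reina considerando el bloqueo."""
--     movs = []
--     direcciones = [
--         (-1, 0), (1, 0), (0, -1), (0, 1),     # Vertical y horizontal
--         (-1, -1), (-1, 1), (1, -1), (1, 1)    # Diagonales
--     ]
--     for df, dc in direcciones:
--         f, c = fila_reina + df, col_reina + dc
--         while 1 <= f <= n and 1 <= c <= n: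
--             if (f, c) == (fila_bloqueo, col_bloqueo):
--                 break
--             movs.append((f, c))
--             f += df
--             c += dc
--     return movs
-- ===== SOURCE B (Python) =====
-- # Closed-form per direction: compute how far the queen reaches (edge distance,
-- # capped just before a collinear blocker) and emit the squares with a range.
--
-- _DIRS = [(-1, 0), (1, 0), (0, -1), (0, 1), (-1, -1), (-1, 1), (1, -1), (1, 1)]
--
--
-- def _axis_limit(n, x, d):
--     """Largest k with x + j*d inside [1, n] for all 1 <= j <= k (None = unbounded)."""
--     if d == 0:
--         return None if 1 <= x <= n else 0
--     if d == 1: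
--         return max(0, n - x) if x >= 0 else 0
--     return max(0, x - 1) if x <= n + 1 else 0
--
--
-- def _blocker_step(fr, cr, fb, cb, df, dc):
--     """The step multiple at which the blocker sits on the (df, dc) ray, if collinear."""
--     if df == 0:
--         return (cb - cr) * dc if fb == fr else None
--     if dc == 0:
--         return (fb - fr) * df if cb == cr else None
--     k = (fb - fr) * df
--     return k if k == (cb - cr) * dc else None
--
--
-- def calcular_movimientos(n, fila_reina, col_reina, fila_bloqueo, col_bloqueo):
--     movs = []
--     for df, dc in _DIRS:
--         lf = _axis_limit(n, fila_reina, df)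
--         lc = _axis_limit(n, col_reina, dc)
--         limit = min(l for l in (lf, lc) if l is not None)
--         k = _blocker_step(fila_reina, col_reina, fila_bloqueo, col_bloqueo, df, dc)
--         if k is not None and 1 <= k <= limit:
--             limit = k - 1
--         movs.extend((fila_reina + j * df, col_reina + j * dc) for j in range(1, limit + 1))
--     return movs
-- ===== Notes on version B (the rewrite author's own statement) =====
-- stated objective: alternative
-- what changed: Replaces the step-by-step while-loop walk along each of the 8 rays with a closed-form reach computation (edge distance per axis, capped just before a collinear blocker) followed by a range comprehension emitting the squares.
import Mathlib
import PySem

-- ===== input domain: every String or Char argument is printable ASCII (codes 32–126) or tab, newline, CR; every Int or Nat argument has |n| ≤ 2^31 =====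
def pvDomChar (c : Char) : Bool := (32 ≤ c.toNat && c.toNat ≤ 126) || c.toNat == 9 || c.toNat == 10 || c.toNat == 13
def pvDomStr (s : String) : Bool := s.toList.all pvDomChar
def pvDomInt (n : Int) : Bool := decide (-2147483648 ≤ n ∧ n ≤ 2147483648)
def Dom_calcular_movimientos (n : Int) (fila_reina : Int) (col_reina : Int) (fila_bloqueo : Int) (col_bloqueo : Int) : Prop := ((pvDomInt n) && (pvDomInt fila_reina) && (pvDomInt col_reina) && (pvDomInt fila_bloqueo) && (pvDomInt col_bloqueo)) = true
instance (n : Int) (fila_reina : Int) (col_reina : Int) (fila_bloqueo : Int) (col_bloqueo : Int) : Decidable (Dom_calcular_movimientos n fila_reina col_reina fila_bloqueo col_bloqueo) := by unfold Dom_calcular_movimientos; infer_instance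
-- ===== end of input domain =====

-- B replaces A's step-by-step ray walk by a closed-form reach per direction
-- (edge distance, capped just before a collinear blocker) plus a range map;
-- same output, alternative structure.

-- ===== PORT A =====
-- A's while-loop along one ray; fuel only makes the same computation total
-- (the loop runs at most n steps, fuel = n.toNat + 1 is always sufficient).
def walkA (n fb cb df dc : Int) : Nat → Int → Int → List (Int × Int)
  | 0, _, _ => []
  | fuel + 1, f, c =>
    if 1 ≤ f ∧ f ≤ n ∧ 1 ≤ c ∧ c ≤ n then
      if f = fb ∧ c = cb then []
      else (f, c) :: walkA n fb cb df dc fuel (f + df) (c + dc)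
    else []

def calcular_movimientos (n : Int) (fila_reina : Int) (col_reina : Int) (fila_bloqueo : Int) (col_bloqueo : Int) : List (Int × Int) :=
  [((-1 : Int), (0 : Int)), (1, 0), (0, -1), (0, 1), (-1, -1), (-1, 1), (1, -1), (1, 1)].foldl
    (fun movs d =>
      movs ++ walkA n fila_bloqueo col_bloqueo d.1 d.2 (n.toNat + 1) (fila_reina + d.1) (col_reina + d.2))
    []

-- ===== PORT B =====
def axisLimit (n x d : Int) : Option Int :=
  if d = 0 then (if 1 ≤ x ∧ x ≤ n then none else some 0)
  else if d = 1 then (if 0 ≤ x then some (max 0 (n - x)) else some 0)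
  else (if x ≤ n + 1 then some (max 0 (x - 1)) else some 0)

def blockerStep (fr cr fb cb df dc : Int) : Option Int :=
  if df = 0 then (if fb = fr then some ((cb - cr) * dc) else none)
  else if dc = 0 then (if cb = cr then some ((fb - fr) * df) else none)
  else if (fb - fr) * df = (cb - cr) * dc then some ((fb - fr) * df) else none

def rayLimit (n fr cr fb cb df dc : Int) : Int :=
  let limit0 : Int :=
    match axisLimit n fr df, axisLimit n cr dc with
    | some a, some b => min a b
    | some a, none => a
    | none, some b => b
    | none, none => 0
  match blockerStep fr cr fb cb df dc with
  | some k => if 1 ≤ k ∧ k ≤ limit0 then k - 1 else limit0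
  | none => limit0

def rayMoves (n fr cr fb cb df dc : Int) : List (Int × Int) :=
  (List.range (rayLimit n fr cr fb cb df dc).toNat).map
    (fun (j : Nat) => (fr + ((j : Int) + 1) * df, cr + ((j : Int) + 1) * dc))

def calcular_movimientos_alt (n : Int) (fila_reina : Int) (col_reina : Int) (fila_bloqueo : Int) (col_bloqueo : Int) : List (Int × Int) :=
  [((-1 : Int), (0 : Int)), (1, 0), (0, -1), (0, 1), (-1, -1), (-1, 1), (1, -1), (1, 1)].foldl
    (fun movs d => movs ++ rayMoves n fila_reina col_reina fila_bloqueo col_bloqueo d.1 d.2)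
    []

-- ===== PRECONDITION & SPEC =====
def Spec_calcular_movimientos (n : Int) (fila_reina : Int) (col_reina : Int) (fila_bloqueo : Int) (col_bloqueo : Int) (out : List (Int × Int)) : Prop := out = calcular_movimientos_alt n fila_reina col_reina fila_bloqueo col_bloqueo
instance (n : Int) (fila_reina : Int) (col_reina : Int) (fila_bloqueo : Int) (col_bloqueo : Int) (out : List (Int × Int)) : Decidable (Spec_calcular_movimientos n fila_reina col_reina fila_bloqueo col_bloqueo out) := by unfold Spec_calcular_movimientos; infer_instance

-- ===== CLAIM (what is proved, stated in full; the proofs are below) =====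
def Claim_equal_calcular_movimientos : Prop := ∀ (n : Int) (fila_reina : Int) (col_reina : Int) (fila_bloqueo : Int) (col_bloqueo : Int), Dom_calcular_movimientos n fila_reina col_reina fila_bloqueo col_bloqueo → Spec_calcular_movimientos n fila_reina col_reina fila_bloqueo col_bloqueo (calcular_movimientos n fila_reina col_reina fila_bloqueo col_bloqueo)

-- ===== LEMMAS AND PROOFS =====

-- A's loop equals a range map when the first L steps are clear and step L+1 stops it.
theorem walk_segment (n fb cb df dc : Int) (L : Nat) :
    ∀ (fr cr : Int) (fuel : Nat), L < fuel →
    (∀ j : Nat, j < L →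
      (1 ≤ fr + ((j : Int) + 1) * df ∧ fr + ((j : Int) + 1) * df ≤ n ∧
       1 ≤ cr + ((j : Int) + 1) * dc ∧ cr + ((j : Int) + 1) * dc ≤ n) ∧
      ¬(fr + ((j : Int) + 1) * df = fb ∧ cr + ((j : Int) + 1) * dc = cb)) →
    (¬(1 ≤ fr + ((L : Int) + 1) * df ∧ fr + ((L : Int) + 1) * df ≤ n ∧
       1 ≤ cr + ((L : Int) + 1) * dc ∧ cr + ((L : Int) + 1) * dc ≤ n) ∨
      (fr + ((L : Int) + 1) * df = fb ∧ cr + ((L : Int) + 1) * dc = cb)) →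
    walkA n fb cb df dc fuel (fr + df) (cr + dc) =
      (List.range L).map (fun (j : Nat) => (fr + ((j : Int) + 1) * df, cr + ((j : Int) + 1) * dc)) := by
  induction L with
  | zero =>
    intro fr cr fuel hfuel _ h2
    obtain ⟨fuel, rfl⟩ : ∃ m, fuel = m + 1 := ⟨fuel - 1, by omega⟩
    simp only [Nat.cast_zero, zero_add, one_mul] at h2
    simp only [List.range_zero, List.map_nil, walkA]
    rcases h2 with h | h
    · rw [if_neg h]
    · by_cases hg : 1 ≤ fr + df ∧ fr + df ≤ n ∧ 1 ≤ cr + dc ∧ cr + dc ≤ n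
      · rw [if_pos hg, if_pos h]
      · rw [if_neg hg]
  | succ L ih =>
    intro fr cr fuel hfuel h1 h2
    obtain ⟨fuel, rfl⟩ : ∃ m, fuel = m + 1 := ⟨fuel - 1, by omega⟩
    have h10 := h1 0 (by omega)
    simp only [Nat.cast_zero, zero_add, one_mul] at h10
    simp only [walkA, if_pos h10.1, if_neg h10.2]
    have ihres := ih (fr + df) (cr + dc) fuel (by omega)
      (fun j hj => by
        have := h1 (j + 1) (by omega)
        push_cast at this ⊢
        constructor
        · constructor; · linarith [this.1.1]
          constructor; · linarith [this.1.2.1]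
          constructor; · linarith [this.1.2.2.1]
          linarith [this.1.2.2.2]
        · intro hc; exact this.2 ⟨by linarith [hc.1], by linarith [hc.2]⟩)
      (by
        push_cast at h2 ⊢
        rcases h2 with h | h
        · left; intro hc; exact h ⟨by linarith [hc.1], by linarith [hc.2.1],
            by linarith [hc.2.2.1], by linarith [hc.2.2.2]⟩
        · right; exact ⟨by linarith [h.1], by linarith [h.2]⟩)
    rw [ihres, List.range_succ_eq_map]
    simp only [List.map_cons, List.map_map, Nat.cast_zero, zero_add, one_mul]
    have hmap : List.map (fun (j : Nat) => (fr + df + ((j:Int) + 1) * df, cr + dc + ((j:Int) + 1) * dc)) (List.range L)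
        = List.map ((fun (j : Nat) => (fr + ((j:Int) + 1) * df, cr + ((j:Int) + 1) * dc)) ∘ Nat.succ) (List.range L) := by
      refine List.map_congr_left ?_
      intro a _
      simp only [Function.comp_apply, Nat.cast_succ, Prod.mk.injEq]
      constructor <;> ring
    rw [hmap]

-- B's rayLimit satisfies exactly those conditions (for each of the 8 directions).
theorem rayLimit_spec (n fr cr fb cb df dc : Int)
    (hdf : df = -1 ∨ df = 0 ∨ df = 1) (hdc : dc = -1 ∨ dc = 0 ∨ dc = 1)
    (hnz : ¬(df = 0 ∧ dc = 0)) :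
    ∀ L : Int, L = rayLimit n fr cr fb cb df dc →
    (L.toNat ≤ n.toNat ∧
    (∀ j : Nat, j < L.toNat →
      (1 ≤ fr + ((j : Int) + 1) * df ∧ fr + ((j : Int) + 1) * df ≤ n ∧
       1 ≤ cr + ((j : Int) + 1) * dc ∧ cr + ((j : Int) + 1) * dc ≤ n) ∧
      ¬(fr + ((j : Int) + 1) * df = fb ∧ cr + ((j : Int) + 1) * dc = cb)) ∧
    (¬(1 ≤ fr + ((L.toNat : Int) + 1) * df ∧ fr + ((L.toNat : Int) + 1) * df ≤ n ∧
       1 ≤ cr + ((L.toNat : Int) + 1) * dc ∧ cr + ((L.toNat : Int) + 1) * dc ≤ n) ∨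
      (fr + ((L.toNat : Int) + 1) * df = fb ∧ cr + ((L.toNat : Int) + 1) * dc = cb))) := by
  intro L hL
  rcases hdf with rfl | rfl | rfl <;> rcases hdc with rfl | rfl | rfl <;>
    first
    | exact absurd ⟨rfl, rfl⟩ hnz
    | (simp only [rayLimit, axisLimit, blockerStep] at hL
       norm_num at hL
       split_ifs at hL <;> (try simp at hL) <;>
         (refine ⟨?_, fun j hj => ⟨?_, ?_⟩, ?_⟩ <;> omega))

theorem walk_eq_ray (n fr cr fb cb df dc : Int)
    (hdf : df = -1 ∨ df = 0 ∨ df = 1) (hdc : dc = -1 ∨ dc = 0 ∨ dc = 1)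
    (hnz : ¬(df = 0 ∧ dc = 0)) :
    walkA n fb cb df dc (n.toNat + 1) (fr + df) (cr + dc) =
      rayMoves n fr cr fb cb df dc := by
  obtain ⟨hfuel, h1, h2⟩ := rayLimit_spec n fr cr fb cb df dc hdf hdc hnz _ rfl
  exact walk_segment n fb cb df dc _ fr cr _ (by omega) h1 h2

-- ===== VERDICT (by name: the statement is the Claim_ definition above) =====
theorem calcular_movimientos_spec : Claim_equal_calcular_movimientos := by
  intro n fr cr fb cb _
  unfold Spec_calcular_movimientos calcular_movimientos calcular_movimientos_alt
  simp only [List.foldl]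
  rw [walk_eq_ray n fr cr fb cb (-1) 0 (by norm_num) (by norm_num) (by norm_num),
      walk_eq_ray n fr cr fb cb 1 0 (by norm_num) (by norm_num) (by norm_num),
      walk_eq_ray n fr cr fb cb 0 (-1) (by norm_num) (by norm_num) (by norm_num),
      walk_eq_ray n fr cr fb cb 0 1 (by norm_num) (by norm_num) (by norm_num),
      walk_eq_ray n fr cr fb cb (-1) (-1) (by norm_num) (by norm_num) (by norm_num),
      walk_eq_ray n fr cr fb cb (-1) 1 (by norm_num) (by norm_num) (by norm_num),
      walk_eq_ray n fr cr fb cb 1 (-1) (by norm_num) (by norm_num) (by norm_num),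
      walk_eq_ray n fr cr fb cb 1 1 (by norm_num) (by norm_num) (by norm_num)]
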